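-- pv_equiv track=rewrite | github.com/SanyaShilov/ProjectEuler | euler.py | notdivisible
-- ===== SOURCE A (Python) =====
-- def notdivisible (num, ar, ind) :
--     ''' ind = len(ar)'''
--     res = num
--     for i in range(ind) :
--         r = num//ar[i]
--         if not r :
--             break
--         res -= notdivisible(r, ar, i)
--     return res
-- ===== SOURCE B (Python) =====
-- def notdivisible(num, ar, ind):
--     ''' ind = len(ar)'''
--     # Iterative worklist: each stack entry (sign, n, k) stands for one pending
--     # recursive call of the inclusion-exclusion recurrence; its own value n is
--     # added to the running total with its sign, and its children (the non-broken
--     # prefix of quotients) are pushed.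
--     total = 0
--     stack = [(1, num, ind)]
--     while stack:
--         sign, n, k = stack.pop()
--         total += sign * n
--         children = []
--         for i in range(k):
--             r = n // ar[i]
--             if not r:
--                 break
--             children.append((-sign, r, i))
--         stack.extend(children)
--     return total
-- ===== Notes on version B (the rewrite author's own statement) =====
-- stated objective: alternative
-- what changed: A's direct self-recursion (res -= notdivisible(r, ar, i) inside the loop) is replaced by an iterative worklist: an explicit stack of signed pending entries (sign, n, k) and a running total, so B has no recursion and no call-stack depth limit.
import Mathlib
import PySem

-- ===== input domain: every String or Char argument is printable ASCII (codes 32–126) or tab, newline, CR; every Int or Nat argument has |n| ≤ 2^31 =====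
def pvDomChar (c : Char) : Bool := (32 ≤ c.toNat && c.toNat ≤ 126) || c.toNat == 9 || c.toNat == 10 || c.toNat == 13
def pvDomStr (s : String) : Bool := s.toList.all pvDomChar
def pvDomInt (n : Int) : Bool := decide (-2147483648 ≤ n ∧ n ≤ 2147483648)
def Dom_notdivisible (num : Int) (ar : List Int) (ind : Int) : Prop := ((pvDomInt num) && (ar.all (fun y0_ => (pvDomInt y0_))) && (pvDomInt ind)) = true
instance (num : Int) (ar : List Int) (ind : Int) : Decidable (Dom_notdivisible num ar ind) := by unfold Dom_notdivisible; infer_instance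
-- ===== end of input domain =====

-- B replaces A's direct self-recursion by an iterative worklist (explicit stack of signed
-- pending calls with a running total); equivalence of return values is proved on Pre_.

-- ===== PORT A =====
-- literal port of A: the for-loop over range(ind) with break; the recursive call is the
-- `rec` argument. `todo` counts the remaining loop iterations (called with todo = n).
-- ar[i] is pyGetD (in range under Pre_), // is PySem.Int.floordiv (divisor ≠ 0 under Pre_).
def ndA_loop (ar : List Int) (num : Int) (n : Nat) (rec : Int → Nat → Int) :
    Nat → Nat → Int → Int
  | 0, _, res => res
  | todo + 1, i, res =>
    if i < n then
      let r := PySem.Int.floordiv num (PySem.List.pyGetD ar (i : Int) 0)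
      if r = 0 then res
      else ndA_loop ar num n rec todo (i + 1) (res - rec r i)
    else res

-- A's recursion, made structural on a fuel bound: every recursive call of A strictly
-- lowers the index bound n, so fuel = n is always enough (ndA_fuel_irrel below).
def ndA (ar : List Int) : Nat → Int → Nat → Int
  | 0, num, _ => num
  | fuel + 1, num, n => ndA_loop ar num n (fun r i => ndA ar fuel r i) n 0 num

def notdivisible (num : Int) (ar : List Int) (ind : Int) : Int :=
  ndA ar ind.toNat num ind.toNat

-- ===== PORT B =====
-- stack entries (sign, n, k); the stack is kept top-at-head (python append/pop at the end)
-- the children list Source B's inner for-loop (with break) collects for one popped entry;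
-- `todo` counts the remaining iterations (called with todo = k)
def ndB_push (ar : List Int) (sign n : Int) (k : Nat) : Nat → Nat → List (Int × Int × Nat)
  | 0, _ => []
  | todo + 1, i =>
    if i < k then
      let r := PySem.Int.floordiv n (PySem.List.pyGetD ar (i : Int) 0)
      if r = 0 then []
      else (-sign, r, i) :: ndB_push ar sign n k todo (i + 1)
    else []

-- Source B's while-loop, made structural on a fuel bound: the weight pvStackW strictly
-- decreases at each pop (pvStackW_push_le below), so fuel = 2 ^ ind is always enough.
def ndB_go (ar : List Int) : Nat → List (Int × Int × Nat) → Int → Int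
  | 0, _, total => total
  | _ + 1, [], total => total
  | fuel + 1, (sign, n, k) :: rest, total =>
    ndB_go ar fuel ((ndB_push ar sign n k k 0).reverse ++ rest) (total + sign * n)

def notdivisible_alt (num : Int) (ar : List Int) (ind : Int) : Int :=
  ndB_go ar (2 ^ ind.toNat) [(1, num, ind.toNat)] 0

-- ===== PRECONDITION & SPEC =====
-- Pre_ = exactly the inputs on which A returns: A raises (IndexError/ZeroDivisionError)
-- iff the loop reaches a zero or out-of-range entry of ar[:ind], i.e. iff no earlier
-- entry gives a zero quotient num//ar[j] (the break); recursive calls only divide by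
-- entries the outer loop already divided by, so they never raise first.
def Pre_notdivisible (num : Int) (ar : List Int) (ind : Int) : Prop :=
  ∀ i < min ind.toNat (ar.length + 1), (ar.length ≤ i ∨ ar.getD i 1 = 0) →
    ∃ j < i, PySem.Int.floordiv num (ar.getD j 1) = 0
instance (num : Int) (ar : List Int) (ind : Int) : Decidable (Pre_notdivisible num ar ind) := by
  unfold Pre_notdivisible; infer_instance

def pvWitness_notdivisible : Int × List Int × Int := (10, [2, 3], 2)

def Spec_notdivisible (num : Int) (ar : List Int) (ind : Int) (out : Int) : Prop := out = notdivisible_alt num ar ind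
instance (num : Int) (ar : List Int) (ind : Int) (out : Int) : Decidable (Spec_notdivisible num ar ind out) := by unfold Spec_notdivisible; infer_instance

-- ===== CLAIM (what is proved, stated in full; the proofs are below) =====
def Claim_equal_notdivisible : Prop := ∀ (num : Int) (ar : List Int) (ind : Int), Dom_notdivisible num ar ind → Pre_notdivisible num ar ind → Spec_notdivisible num ar ind (notdivisible num ar ind)

-- ===== LEMMAS AND PROOFS =====

-- weight of a pending stack: proof-side measure for the fuel bound
def pvStackW (st : List (Int × Int × Nat)) : Nat := (st.map (fun e => 2 ^ e.2.2)).sum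

-- weight of the pushed children: all their indices lie below k, each used once
theorem pvStackW_push_le (ar : List Int) (sign n : Int) (k : Nat) :
    ∀ todo i, i ≤ k → pvStackW (ndB_push ar sign n k todo i) ≤ 2 ^ k - 2 ^ i := by
  intro todo
  induction todo with
  | zero =>
    intro i hik
    have : 2 ^ i ≤ 2 ^ k := Nat.pow_le_pow_right (by norm_num) hik
    simp [ndB_push, pvStackW]
  | succ todo ih =>
    intro i hik
    rw [ndB_push]
    split
    · dsimp only
      split
      · have : 2 ^ i ≤ 2 ^ k := Nat.pow_le_pow_right (by norm_num) hik
        simp [pvStackW]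
      · have h1 := ih (i + 1) (by omega)
        have h2 : 2 ^ i < 2 ^ (i + 1) := Nat.pow_lt_pow_right (by norm_num) (by omega)
        have h3 : 2 ^ (i + 1) ≤ 2 ^ k := Nat.pow_le_pow_right (by norm_num) (by omega)
        simp only [pvStackW, List.map_cons, List.sum_cons] at *
        omega
    · have : 2 ^ i ≤ 2 ^ k := Nat.pow_le_pow_right (by norm_num) hik
      simp [pvStackW]

-- the pushed children depend on the sign only through their first component
theorem ndB_push_sign (ar : List Int) (sign n : Int) (k : Nat) :
    ∀ todo i, ndB_push ar sign n k todo i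
      = (ndB_push ar 1 n k todo i).map (fun e => (sign * e.1, e.2)) := by
  intro todo
  induction todo with
  | zero => intro i; simp [ndB_push]
  | succ todo ih =>
    intro i
    rw [ndB_push]
    conv_rhs => rw [ndB_push]
    split
    · dsimp only
      split
      · simp
      · simp only [List.map_cons, ih (i + 1)]
        ring_nf
    · simp

-- every pushed child carries an index below the popped entry's bound k
theorem ndB_push_lt (ar : List Int) (sign n : Int) (k : Nat) :
    ∀ todo i, ∀ e ∈ ndB_push ar sign n k todo i, e.2.2 < k := by
  intro todo
  induction todo with
  | zero => intro i e he; simp [ndB_push] at he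
  | succ todo ih =>
    intro i e he
    rw [ndB_push] at he
    split at he
    · dsimp only at he
      split at he
      · simp at he
      · rcases List.mem_cons.mp he with h | h
        · subst h; assumption
        · exact ih (i + 1) e h
    · simp at he

-- A's loop equals res plus the signed sum of `rec`-values over the children list
theorem ndA_loop_eq_push (ar : List Int) (num : Int) (n : Nat) (rec : Int → Nat → Int) :
    ∀ todo i res, ndA_loop ar num n rec todo i res
      = res + ((ndB_push ar 1 num n todo i).map (fun e => e.1 * rec e.2.1 e.2.2)).sum := by
  intro todo
  induction todo with
  | zero => intro i res; simp [ndA_loop, ndB_push]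
  | succ todo ih =>
    intro i res
    rw [ndA_loop, ndB_push]
    split
    · dsimp only
      split
      · simp
      · rw [ih (i + 1)]
        simp only [List.map_cons, List.sum_cons]
        ring
    · simp

-- A's loop only calls `rec` at indices below n
theorem ndA_loop_congr (ar : List Int) (num : Int) (n : Nat) (rec₁ rec₂ : Int → Nat → Int)
    (h : ∀ r i, i < n → rec₁ r i = rec₂ r i) :
    ∀ todo i res, ndA_loop ar num n rec₁ todo i res = ndA_loop ar num n rec₂ todo i res := by
  intro todo
  induction todo with
  | zero => intro i res; simp [ndA_loop]
  | succ todo ih =>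
    intro i res
    rw [ndA_loop]
    conv_rhs => rw [ndA_loop]
    split
    · dsimp only
      split
      · rfl
      · rw [h _ _ (by assumption), ih]
    · rfl

-- any fuel ≥ n computes the same value as fuel = n (so fuel is a pure termination device)
theorem ndA_fuel_irrel (ar : List Int) :
    ∀ fuel num n, n ≤ fuel → ndA ar fuel num n = ndA ar n num n := by
  intro fuel
  induction fuel using Nat.strong_induction_on with
  | _ fuel ih =>
    intro num n hn
    match fuel, n with
    | 0, 0 => rfl
    | fuel + 1, 0 =>
      rw [ndA, ndA]
      simp [ndA_loop]
    | fuel + 1, m + 1 =>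
      rw [ndA]
      conv_rhs => rw [ndA]
      exact ndA_loop_congr ar num (m + 1) _ _
        (fun r i hi => by
          rw [ih fuel (by omega) r i (by omega), ih m (by omega) r i (by omega)])
        (m + 1) 0 num

-- the worklist loop adds the signed sum of A's values over every pending entry
theorem ndB_go_eq (ar : List Int) :
    ∀ fuel st total, pvStackW st ≤ fuel →
      ndB_go ar fuel st total
        = total + (st.map (fun e => e.1 * ndA ar e.2.2 e.2.1 e.2.2)).sum := by
  intro fuel
  induction fuel with
  | zero =>
    intro st total h
    match st with
    | [] => simp [ndB_go]
    | (sign, n, k) :: rest =>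
      exfalso
      have : 1 ≤ 2 ^ k := Nat.one_le_two_pow
      simp only [pvStackW, List.map_cons, List.sum_cons] at h
      omega
  | succ fuel ih =>
    intro st total h
    match st with
    | [] => simp [ndB_go]
    | (sign, n, k) :: rest =>
      rw [ndB_go]
      have hpw := pvStackW_push_le ar sign n k k 0 (Nat.zero_le k)
      have h2 : 1 ≤ 2 ^ k := Nat.one_le_two_pow
      have hlt : pvStackW ((ndB_push ar sign n k k 0).reverse ++ rest) ≤ fuel := by
        simp only [pvStackW, List.map_append, List.map_reverse, List.sum_append,
          List.sum_reverse, List.map_cons, List.sum_cons] at *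
        omega
      rw [ih _ _ hlt]
      simp only [List.map_append, List.map_reverse, List.sum_append, List.sum_reverse,
        List.map_cons, List.sum_cons]
      have hA : ndA ar k n k = n +
          ((ndB_push ar 1 n k k 0).map (fun e => e.1 * ndA ar e.2.2 e.2.1 e.2.2)).sum := by
        match k with
        | 0 => simp [ndA, ndB_push]
        | m + 1 =>
          rw [ndA, ndA_loop_eq_push]
          congr 1
          refine congrArg _ (List.map_congr_left fun e he => ?_)
          have hlt' := ndB_push_lt ar 1 n (m + 1) (m + 1) 0 e he
          rw [ndA_fuel_irrel ar m e.2.1 e.2.2 (by omega)]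
      rw [ndB_push_sign]
      have hsum : ((ndB_push ar 1 n k k 0).map
            ((fun e => e.1 * ndA ar e.2.2 e.2.1 e.2.2) ∘ fun e => (sign * e.1, e.2))).sum
          = sign * ((ndB_push ar 1 n k k 0).map (fun e => e.1 * ndA ar e.2.2 e.2.1 e.2.2)).sum := by
        induction ndB_push ar 1 n k k 0 with
        | nil => simp
        | cons x xs ihx => simp only [List.map_cons, List.sum_cons, ihx]; dsimp; ring
      rw [List.map_map, hsum, hA]
      ring

-- ===== VERDICT (by name: the statement is the Claim_ definition above) =====
theorem notdivisible_spec : Claim_equal_notdivisible := by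
  intro num ar ind _ _
  unfold Spec_notdivisible notdivisible notdivisible_alt
  rw [ndB_go_eq ar (2 ^ ind.toNat) _ _ (by simp [pvStackW])]
  simp
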